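-- pv_equiv track=rewrite | github.com/SudoSuOps/Swarn-chain | simulator/worker.py | scale_2x
-- ===== SOURCE A (Python) =====
-- Grid = list[list[int]]
--
-- def _grid_dims(grid: Grid) -> tuple[int, int]:
--     rows = len(grid)
--     cols = len(grid[0]) if rows > 0 else 0
--     return rows, cols
--
-- def _clamp_to_dims(grid: Grid, rows: int, cols: int) -> Grid:
--     result: Grid = []
--     for r in range(rows):
--         if r < len(grid):
--             src_row = grid[r]
--             new_row = [src_row[c] if c < len(src_row) else 0 for c in range(cols)]
--         else:
--             new_row = [0] * cols
--         result.append(new_row)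
--     return result
--
-- def scale_2x(
--     input_grid: Grid,
--     expected_dims: tuple[int, int],
--     parent_grid: Grid | None = None,
-- ) -> Grid:
--     """Scale the grid 2x -- each cell becomes a 2x2 block."""
--     rows, cols = _grid_dims(input_grid)
--     scaled: Grid = []
--     for r in range(rows):
--         row_a: list[int] = []
--         row_b: list[int] = []
--         for c in range(cols):
--             val = input_grid[r][c]
--             row_a.extend([val, val])
--             row_b.extend([val, val])
--         scaled.append(row_a)
--         scaled.append(row_b)
--     return _clamp_to_dims(scaled, *expected_dims)
-- ===== SOURCE B (Python) =====
-- def scale_2x(input_grid, expected_dims, parent_grid=None):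
--     """Scale the grid 2x -- each cell becomes a 2x2 block; fused with the clamp/pad."""
--     out_rows, out_cols = expected_dims
--     rows = len(input_grid)
--     cols = len(input_grid[0]) if rows > 0 else 0
--     return [
--         [input_grid[r // 2][c // 2] if r < 2 * rows and c < 2 * cols else 0
--          for c in range(out_cols)]
--         for r in range(out_rows)
--     ]
-- ===== Notes on version B (the rewrite author's own statement) =====
-- stated objective: simpler
-- what changed: B fuses A's two phases (build the full 2x-scaled intermediate grid, then clamp/pad it to expected_dims) into a single nested comprehension that computes each output cell directly as input_grid[r//2][c//2] with a bounds test, eliminating the intermediate grid entirely.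
import Mathlib
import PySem

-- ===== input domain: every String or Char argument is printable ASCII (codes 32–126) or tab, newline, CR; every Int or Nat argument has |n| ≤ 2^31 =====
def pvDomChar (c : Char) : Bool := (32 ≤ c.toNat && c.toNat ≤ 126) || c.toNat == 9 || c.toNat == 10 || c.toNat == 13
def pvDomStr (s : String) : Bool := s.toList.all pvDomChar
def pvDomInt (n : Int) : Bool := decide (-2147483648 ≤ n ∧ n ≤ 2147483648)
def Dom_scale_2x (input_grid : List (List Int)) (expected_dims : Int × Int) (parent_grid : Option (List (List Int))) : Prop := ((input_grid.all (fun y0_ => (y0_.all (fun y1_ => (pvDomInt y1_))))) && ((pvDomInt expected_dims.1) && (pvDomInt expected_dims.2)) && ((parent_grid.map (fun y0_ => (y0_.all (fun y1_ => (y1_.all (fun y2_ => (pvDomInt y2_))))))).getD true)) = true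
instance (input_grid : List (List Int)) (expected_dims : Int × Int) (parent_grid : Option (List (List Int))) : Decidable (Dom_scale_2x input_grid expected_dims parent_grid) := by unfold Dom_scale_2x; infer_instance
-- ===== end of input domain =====

-- B fuses the build-then-clamp two-phase of A into one direct pass (input_grid[r//2][c//2] with bounds test);
-- objective: simpler (no intermediate scaled grid). parent_grid is unused by both.

-- ===== PORT A =====
-- literal transliteration of A: _grid_dims, the 2x scaling loop (row_a/row_b pair built
-- by repeated extend), then _clamp_to_dims over expected_dims.
-- input_grid[r][c] is ported as pyGetD (in range under Pre_scale_2x; Python raises outside it).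
def scale_2x (input_grid : List (List Int)) (expected_dims : Int × Int) (parent_grid : Option (List (List Int))) : List (List Int) :=
  let rows : Nat := input_grid.length
  let cols : Nat := if rows > 0 then (input_grid.headD []).length else 0
  let scaled : List (List Int) :=
    (List.range rows).foldl (fun scaled (r : Nat) =>
      let rowpair : List Int × List Int :=
        (List.range cols).foldl (fun (p : List Int × List Int) (c : Nat) =>
          let val : Int := PySem.List.pyGetD (PySem.List.pyGetD input_grid (r : Int) []) (c : Int) 0
          (p.1 ++ [val, val], p.2 ++ [val, val])) ([], [])
      scaled ++ [rowpair.1, rowpair.2]) []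
  -- _clamp_to_dims(scaled, *expected_dims)
  (PySem.List.pyRange 0 expected_dims.1 1).foldl (fun result r =>
    let new_row : List Int :=
      if r < (scaled.length : Int) then
        let src_row := PySem.List.pyGetD scaled r []
        (PySem.List.pyRange 0 expected_dims.2 1).map (fun c =>
          if c < (src_row.length : Int) then PySem.List.pyGetD src_row c 0 else 0)
      else
        List.replicate expected_dims.2.toNat 0   -- [0] * cols (empty for cols ≤ 0, as in Python)
    result ++ [new_row]) []

-- ===== PORT B =====
-- literal transliteration of Source B: one fused comprehension over the output dimensions.
def scale_2x_alt (input_grid : List (List Int)) (expected_dims : Int × Int) (parent_grid : Option (List (List Int))) : List (List Int) :=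
  let rows : Nat := input_grid.length
  let cols : Nat := if rows > 0 then (input_grid.headD []).length else 0
  (PySem.List.pyRange 0 expected_dims.1 1).map (fun r =>
    (PySem.List.pyRange 0 expected_dims.2 1).map (fun c =>
      if r < 2 * (rows : Int) ∧ c < 2 * (cols : Int) then
        PySem.List.pyGetD (PySem.List.pyGetD input_grid (PySem.Int.floordiv r 2) []) (PySem.Int.floordiv c 2) 0
      else 0))

-- ===== PRECONDITION & SPEC =====
-- Pre_ excludes exactly the ragged grids with a row shorter than row 0: there Python A
-- raises IndexError (input_grid[r][c] with c ranging over len(input_grid[0])).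
def Pre_scale_2x (input_grid : List (List Int)) (expected_dims : Int × Int) (parent_grid : Option (List (List Int))) : Prop :=
  ∀ row ∈ input_grid, (input_grid.headD []).length ≤ row.length
instance (input_grid : List (List Int)) (expected_dims : Int × Int) (parent_grid : Option (List (List Int))) : Decidable (Pre_scale_2x input_grid expected_dims parent_grid) := by unfold Pre_scale_2x; infer_instance
def pvWitness_scale_2x : List (List Int) × (Int × Int) × Option (List (List Int)) := ([[1, 2], [3, 4]], (3, 5), none)

def Spec_scale_2x (input_grid : List (List Int)) (expected_dims : Int × Int) (parent_grid : Option (List (List Int))) (out : List (List Int)) : Prop := out = scale_2x_alt input_grid expected_dims parent_grid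
instance (input_grid : List (List Int)) (expected_dims : Int × Int) (parent_grid : Option (List (List Int))) (out : List (List Int)) : Decidable (Spec_scale_2x input_grid expected_dims parent_grid out) := by unfold Spec_scale_2x; infer_instance

-- ===== CLAIM (what is proved, stated in full; the proofs are below) =====
def Claim_equal_scale_2x : Prop := ∀ (input_grid : List (List Int)) (expected_dims : Int × Int) (parent_grid : Option (List (List Int))), Dom_scale_2x input_grid expected_dims parent_grid → Pre_scale_2x input_grid expected_dims parent_grid → Spec_scale_2x input_grid expected_dims parent_grid (scale_2x input_grid expected_dims parent_grid)

-- ===== LEMMAS AND PROOFS =====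

-- proof-side abbreviations: cell value, duplicated row, 2x-scaled grid
def pvCell (ig : List (List Int)) (r c : Nat) : Int :=
  PySem.List.pyGetD (PySem.List.pyGetD ig (r : Int) []) (c : Int) 0

def pvRow (ig : List (List Int)) (cols r : Nat) : List Int :=
  (List.range cols).flatMap (fun c => [pvCell ig r c, pvCell ig r c])

def pvScaled (ig : List (List Int)) (rows cols : Nat) : List (List Int) :=
  (List.range rows).flatMap (fun r => [pvRow ig cols r, pvRow ig cols r])

-- the inner pair-building foldl yields two copies of the duplicated row
theorem pv_foldl_pair {α : Type} (l : List α) (g : α → Int) (a b : List Int) :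
    l.foldl (fun (p : List Int × List Int) c => (p.1 ++ [g c, g c], p.2 ++ [g c, g c])) (a, b)
      = (a ++ l.flatMap (fun c => [g c, g c]), b ++ l.flatMap (fun c => [g c, g c])) := by
  induction l generalizing a b with
  | nil => simp
  | cons x t ih => simp [ih]

-- the outer append-two foldl is a flatMap of two-element blocks
theorem pv_foldl_two {α β : Type} (l : List α) (g : α → β) (init : List β) :
    l.foldl (fun s r => s ++ [g r, g r]) init = init ++ l.flatMap (fun r => [g r, g r]) := by
  induction l generalizing init with
  | nil => simp
  | cons x t ih => simp [ih]

theorem pv_getElem?_flatMap_pair {α β : Type} (l : List α) (g : α → β) (k : Nat) :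
    (l.flatMap (fun x => [g x, g x]))[k]? = (l[k / 2]?).map g := by
  induction l generalizing k with
  | nil => simp
  | cons x t ih =>
    match k with
    | 0 => simp
    | 1 => simp
    | (n + 2) =>
      have h2 : (n + 2) / 2 = n / 2 + 1 := by omega
      simp [List.flatMap_cons, ih n, h2]

theorem pv_length_flatMap_pair {α β : Type} (l : List α) (g : α → β) :
    (l.flatMap (fun x => [g x, g x])).length = 2 * l.length := by
  induction l with
  | nil => simp
  | cons x t ih => simp [ih]; omega

theorem pv_len_scaled (ig : List (List Int)) (rows cols : Nat) :
    (pvScaled ig rows cols).length = 2 * rows := by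
  unfold pvScaled; rw [pv_length_flatMap_pair]; simp

theorem pv_len_row (ig : List (List Int)) (cols r : Nat) :
    (pvRow ig cols r).length = 2 * cols := by
  unfold pvRow; rw [pv_length_flatMap_pair]; simp

theorem pv_scaled_eq (ig : List (List Int)) (rows cols : Nat) :
    (List.range rows).foldl (fun scaled (r : Nat) =>
      let rowpair : List Int × List Int :=
        (List.range cols).foldl (fun (p : List Int × List Int) (c : Nat) =>
          let val : Int := PySem.List.pyGetD (PySem.List.pyGetD ig (r : Int) []) (c : Int) 0
          (p.1 ++ [val, val], p.2 ++ [val, val])) ([], [])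
      scaled ++ [rowpair.1, rowpair.2]) []
    = pvScaled ig rows cols := by
  have h1 : ∀ r : Nat, (List.range cols).foldl (fun (p : List Int × List Int) (c : Nat) =>
      let val : Int := PySem.List.pyGetD (PySem.List.pyGetD ig (r : Int) []) (c : Int) 0
      (p.1 ++ [val, val], p.2 ++ [val, val])) ([], [])
      = (pvRow ig cols r, pvRow ig cols r) := fun r =>
    pv_foldl_pair (List.range cols) (fun c => pvCell ig r c) [] []
  simp only [h1]
  exact pv_foldl_two (List.range rows) (fun r => pvRow ig cols r) []

theorem pv_pyGetD_scaled (ig : List (List Int)) (rows cols : Nat) (r : Int)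
    (h0 : 0 ≤ r) (h1 : r < 2 * (rows : Int)) :
    PySem.List.pyGetD (pvScaled ig rows cols) r [] = pvRow ig cols (r.toNat / 2) := by
  rw [PySem.List.pyGetD_eq_getElem _ _ h0 (by rw [pv_len_scaled]; push_cast; omega)]
  have hget : (pvScaled ig rows cols)[r.toNat]? = some (pvRow ig cols (r.toNat / 2)) := by
    unfold pvScaled
    rw [pv_getElem?_flatMap_pair]
    have hk : r.toNat / 2 < rows := by omega
    simp [hk]
  have hlt : r.toNat < (pvScaled ig rows cols).length := by rw [pv_len_scaled]; omega
  rw [List.getElem?_eq_getElem hlt] at hget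
  exact Option.some.injEq _ _ ▸ (by simpa using hget)

theorem pv_pyGetD_row (ig : List (List Int)) (cols r : Nat) (c : Int)
    (h0 : 0 ≤ c) (h1 : c < 2 * (cols : Int)) :
    PySem.List.pyGetD (pvRow ig cols r) c 0 = pvCell ig r (c.toNat / 2) := by
  rw [PySem.List.pyGetD_eq_getElem _ _ h0 (by rw [pv_len_row]; push_cast; omega)]
  have hget : (pvRow ig cols r)[c.toNat]? = some (pvCell ig r (c.toNat / 2)) := by
    unfold pvRow
    rw [pv_getElem?_flatMap_pair]
    have hk : c.toNat / 2 < cols := by omega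
    simp [hk]
  have hlt : c.toNat < (pvRow ig cols r).length := by rw [pv_len_row]; omega
  rw [List.getElem?_eq_getElem hlt] at hget
  exact Option.some.injEq _ _ ▸ (by simpa using hget)

theorem pv_floordiv_two (r : Int) (h0 : 0 ≤ r) :
    PySem.Int.floordiv r 2 = ((r.toNat / 2 : Nat) : Int) := by
  rw [PySem.Int.floordiv_eq_ediv_of_pos (by norm_num)]
  omega

-- characterisation of port A as a double map over the output ranges
theorem pv_A_char (ig : List (List Int)) (er ec : Int) (pg : Option (List (List Int))) :
    scale_2x ig (er, ec) pg =
      (PySem.List.pyRange 0 er 1).map (fun r =>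
        if r < ((pvScaled ig ig.length (ig.headD []).length).length : Int) then
          (PySem.List.pyRange 0 ec 1).map (fun c =>
            if c < ((PySem.List.pyGetD (pvScaled ig ig.length (ig.headD []).length) r []).length : Int)
            then PySem.List.pyGetD (PySem.List.pyGetD (pvScaled ig ig.length (ig.headD []).length) r []) c 0
            else 0)
        else List.replicate ec.toNat 0) := by
  have hcols : (if ig.length > 0 then (ig.headD []).length else 0) = (ig.headD []).length := by
    cases ig <;> simp
  unfold scale_2x
  simp only [hcols, pv_scaled_eq]
  simpa using
    PySem.List.foldl_append_singleton_eq_map (fun r =>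
      if r < ((pvScaled ig ig.length (ig.headD []).length).length : Int) then
        (PySem.List.pyRange 0 ec 1).map (fun c =>
          if c < ((PySem.List.pyGetD (pvScaled ig ig.length (ig.headD []).length) r []).length : Int)
          then PySem.List.pyGetD (PySem.List.pyGetD (pvScaled ig ig.length (ig.headD []).length) r []) c 0
          else 0)
      else List.replicate ec.toNat 0) (PySem.List.pyRange 0 er 1) []

-- ===== VERDICT (by name: the statement is the Claim_ definition above) =====
theorem scale_2x_spec : Claim_equal_scale_2x := by
  intro ig ed pg _hdom _hpre
  obtain ⟨er, ec⟩ := ed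
  unfold Spec_scale_2x
  rw [pv_A_char]
  have hcols : (if ig.length > 0 then (ig.headD []).length else 0) = (ig.headD []).length := by
    cases ig <;> simp
  unfold scale_2x_alt
  simp only [hcols]
  apply List.map_congr_left
  intro r hr
  obtain ⟨hr0, _⟩ := PySem.List.mem_pyRange_one.mp hr
  rw [pv_len_scaled]
  by_cases hr2 : r < 2 * (ig.length : Int)
  · rw [if_pos (by push_cast; omega)]
    rw [pv_pyGetD_scaled ig ig.length (ig.headD []).length r hr0 hr2]
    apply List.map_congr_left
    intro c hc
    obtain ⟨hc0, _⟩ := PySem.List.mem_pyRange_one.mp hc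
    rw [pv_len_row]
    by_cases hc2 : c < 2 * ((ig.headD []).length : Int)
    · rw [if_pos (by push_cast; omega), if_pos ⟨hr2, hc2⟩]
      rw [pv_pyGetD_row ig (ig.headD []).length _ c hc0 hc2]
      unfold pvCell
      rw [pv_floordiv_two r hr0, pv_floordiv_two c hc0]
    · rw [if_neg (by push_cast; omega), if_neg (by tauto)]
  · rw [if_neg (by push_cast; omega)]
    have : ∀ x ∈ PySem.List.pyRange 0 ec 1, (if r < 2 * (ig.length : Int) ∧ x < 2 * ((ig.headD []).length : Int)
        then PySem.List.pyGetD (PySem.List.pyGetD ig (PySem.Int.floordiv r 2) []) (PySem.Int.floordiv x 2) 0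
        else 0) = (0 : Int) := by
      intro x _; rw [if_neg (by tauto)]
    rw [List.map_congr_left this, List.map_const']
    rw [PySem.List.length_pyRange_one]
    norm_num
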